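-- pv_equiv track=rewrite | github.com/Jag2007/mem_ai | memory_store.py | _is_near_pref_match
-- ===== SOURCE A (Python) =====
-- def _is_near_pref_match(a: str, b: str) -> bool:
--     if a == b:
--         return True
--     if abs(len(a) - len(b)) > 1:
--         return False
--     if (a in b or b in a) and min(len(a), len(b)) >= 4:
--         return True
--     # one-edit-distance check
--     i = 0
--     j = 0
--     edits = 0
--     while i < len(a) and j < len(b):
--         if a[i] == b[j]:
--             i += 1
--             j += 1
--             continue
--         edits += 1
--         if edits > 1:
--             return False
--         if len(a) > len(b):
--             i += 1
--         elif len(b) > len(a):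
--             j += 1
--         else:
--             i += 1
--             j += 1
--     if i < len(a) or j < len(b):
--         edits += 1
--     return edits <= 1
-- ===== SOURCE B (Python) =====
-- def _is_near_pref_match(a: str, b: str) -> bool:
--     if a == b:
--         return True
--     if abs(len(a) - len(b)) > 1:
--         return False
--     if len(a) == len(b):
--         # exactly one substituted position
--         return sum(x != y for x, y in zip(a, b)) == 1
--     s, t = (a, b) if len(a) < len(b) else (b, a)
--     for i in range(len(s)):
--         if s[i] != t[i]:
--             return s[i:] == t[i + 1:]
--     return True
-- ===== Notes on version B (the rewrite author's own statement) =====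
-- stated objective: simpler
-- what changed: Replaced A's single greedy two-pointer merge loop and its redundant substring/min>=4 shortcut with a length case split: equal lengths return whether exactly one zipped position differs; lengths off by one scan for the first mismatch and compare the remaining suffixes.
import Mathlib
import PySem

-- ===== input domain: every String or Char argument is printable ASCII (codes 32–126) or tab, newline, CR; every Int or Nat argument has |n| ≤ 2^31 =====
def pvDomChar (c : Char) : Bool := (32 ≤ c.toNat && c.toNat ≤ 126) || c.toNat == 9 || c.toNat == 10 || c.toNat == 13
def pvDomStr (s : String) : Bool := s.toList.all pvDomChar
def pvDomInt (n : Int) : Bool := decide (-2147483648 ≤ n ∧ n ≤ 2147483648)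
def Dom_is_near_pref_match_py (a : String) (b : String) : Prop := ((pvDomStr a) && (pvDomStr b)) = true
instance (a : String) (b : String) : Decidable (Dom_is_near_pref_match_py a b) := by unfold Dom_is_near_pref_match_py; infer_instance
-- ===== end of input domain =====

-- B replaces A's single greedy two-pointer merge loop (and its redundant substring/min>=4
-- shortcut) by a case split on the lengths: equal lengths -> exactly one mismatching position;
-- lengths off by one -> first-mismatch scan with a suffix comparison. Objective: simpler.

-- ===== PORT A =====
-- the while loop of A: cursors i, j become the suffixes xs = a[i:], ys = b[j:];
-- na, nb are len(a), len(b) (constants inside the loop)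
def npLoopA (na nb : Nat) (xs ys : List Char) (edits : Nat) : Bool :=
  match xs, ys with
  | x :: xs', y :: ys' =>
    if x = y then npLoopA na nb xs' ys' edits
    else if edits + 1 > 1 then false
    else if na > nb then npLoopA na nb xs' (y :: ys') (edits + 1)
    else if nb > na then npLoopA na nb (x :: xs') ys' (edits + 1)
    else npLoopA na nb xs' ys' (edits + 1)
  | xs, ys =>
    -- fell out of the loop: 'if i < len(a) or j < len(b): edits += 1; return edits <= 1'
    decide ((if xs ≠ [] ∨ ys ≠ [] then edits + 1 else edits) ≤ 1)
termination_by xs.length + ys.length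

def is_near_pref_match_py (a : String) (b : String) : Bool :=
  if a.toList = b.toList then true
  else if ((a.toList.length : Int) - (b.toList.length : Int)).natAbs > 1 then false
  else if (PySem.Str.isIn a b || PySem.Str.isIn b a) && min a.toList.length b.toList.length ≥ 4 then true
  else npLoopA a.toList.length b.toList.length a.toList b.toList 0

-- ===== PORT B =====
-- 'sum(x != y for x, y in zip(a, b))'
def npMismatches (xs ys : List Char) : Nat := (xs.zip ys).countP (fun p => p.1 ≠ p.2)

-- the for-loop of B: scan s against t for the first mismatch, then compare suffixes
-- (s[i:] == t[i+1:]); called only with t one longer than s, the s-nonempty/t-empty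
-- arm is unreachable from the entry point
def npScan (s t : List Char) : Bool :=
  match s, t with
  | [], _ => true
  | x :: xs, y :: ys => if x = y then npScan xs ys else (x :: xs) = ys
  | _ :: _, [] => false

def is_near_pref_match_py_alt (a : String) (b : String) : Bool :=
  if a.toList = b.toList then true
  else if ((a.toList.length : Int) - (b.toList.length : Int)).natAbs > 1 then false
  else if a.toList.length = b.toList.length then npMismatches a.toList b.toList == 1
  else if a.toList.length < b.toList.length then npScan a.toList b.toList
  else npScan b.toList a.toList

-- ===== PRECONDITION & SPEC =====
def Spec_is_near_pref_match_py (a : String) (b : String) (out : Bool) : Prop := out = is_near_pref_match_py_alt a b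
instance (a : String) (b : String) (out : Bool) : Decidable (Spec_is_near_pref_match_py a b out) := by unfold Spec_is_near_pref_match_py; infer_instance

-- ===== CLAIM (what is proved, stated in full; the proofs are below) =====
def Claim_equal_is_near_pref_match_py : Prop := ∀ (a : String) (b : String), Dom_is_near_pref_match_py a b → Spec_is_near_pref_match_py a b (is_near_pref_match_py a b)

-- ===== LEMMAS AND PROOFS =====

-- equal lengths: A's loop moves in lockstep and counts mismatching positions
theorem npLoopA_eq_len (n : Nat) : ∀ (xs ys : List Char), xs.length = ys.length → ∀ e,
    npLoopA n n xs ys e = decide (e + npMismatches xs ys ≤ 1) := by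
  intro xs
  induction xs with
  | nil => intro ys h e; cases ys with
    | nil => simp [npLoopA, npMismatches]
    | cons y ys => simp at h
  | cons x xs ih =>
    intro ys h e
    cases ys with
    | nil => simp at h
    | cons y ys =>
      simp at h
      by_cases hxy : x = y
      · simp [npLoopA, hxy, ih ys h e, npMismatches]
      · simp only [npLoopA, if_neg hxy, lt_irrefl, if_false]
        by_cases he : e + 1 > 1
        · have : ¬ (e + npMismatches (x :: xs) (y :: ys) ≤ 1) := by
            simp [npMismatches, hxy]; omega
          simp [he, this]
        · have he0 : e = 0 := by omega
          simp only [he, if_false, ih ys h (e + 1)]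
          simp [npMismatches, hxy, he0, Nat.add_comm]

-- zero mismatches with equal lengths means the lists are equal
theorem npMismatches_zero {xs ys : List Char} (h : xs.length = ys.length)
    (h0 : npMismatches xs ys = 0) : xs = ys := by
  induction xs generalizing ys with
  | nil => cases ys with
    | nil => rfl
    | cons y ys => simp at h
  | cons x xs ih =>
    cases ys with
    | nil => simp at h
    | cons y ys =>
      simp at h
      by_cases hxy : x = y
      · subst hxy
        have h0' : npMismatches xs ys = 0 := by
          unfold npMismatches at h0 ⊢
          simpa using h0
        rw [ih h h0']
      · exact absurd h0 (by simp [npMismatches, hxy])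

-- after the first edit with unequal lengths, A's loop only accepts identical remainders
theorem npLoopA_one (na nb : Nat) : ∀ (xs ys : List Char), xs.length = ys.length →
    npLoopA na nb xs ys 1 = decide (xs = ys) := by
  intro xs
  induction xs with
  | nil => intro ys h; cases ys with
    | nil => simp [npLoopA]
    | cons y ys => simp at h
  | cons x xs ih =>
    intro ys h
    cases ys with
    | nil => simp at h
    | cons y ys =>
      simp at h
      by_cases hxy : x = y
      · simp [npLoopA, hxy, ih ys h]
      · simp [npLoopA, hxy]

-- a is shorter by one and the substring shortcut was skipped: A's loop is B's scan
theorem npLoopA_scan (na nb : Nat) (hlt : na < nb) : ∀ (xs ys : List Char),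
    ys.length = xs.length + 1 → npLoopA na nb xs ys 0 = npScan xs ys := by
  intro xs
  induction xs with
  | nil => intro ys h; cases ys with
    | nil => simp at h
    | cons y ys => simp [npLoopA, npScan]
  | cons x xs ih =>
    intro ys h
    cases ys with
    | nil => simp at h
    | cons y ys =>
      simp at h
      by_cases hxy : x = y
      · simp [npLoopA, npScan, hxy, ih ys h]
      · simp only [npLoopA, npScan, if_neg hxy, gt_iff_lt]
        have h1 : ¬ (0 + 1 > 1) := by omega
        have h2 : ¬ (nb < na) := by omega
        simp only [if_neg h1, if_neg h2, if_pos hlt]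
        exact npLoopA_one na nb (x :: xs) ys (by simpa using h.symm)

-- symmetric case: b is shorter by one
theorem npLoopA_scan' (na nb : Nat) (hlt : nb < na) : ∀ (xs ys : List Char),
    xs.length = ys.length + 1 → npLoopA na nb xs ys 0 = npScan ys xs := by
  intro xs
  induction xs with
  | nil => intro ys h; simp at h
  | cons x xs ih =>
    intro ys h
    cases ys with
    | nil =>
      cases xs with
      | nil => simp [npLoopA, npScan]
      | cons z zs => simp at h
    | cons y ys =>
      simp at h
      by_cases hxy : x = y
      · simp [npLoopA, npScan, hxy, ih ys h]
      · simp only [npLoopA, npScan, if_neg hxy, gt_iff_lt]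
        have h1 : ¬ (0 + 1 > 1) := by omega
        simp only [if_neg h1, if_pos hlt]
        have hne : ¬ (y = x) := fun hyx => hxy hyx.symm
        simp only [if_neg hne]
        rw [npLoopA_one na nb xs (y :: ys) (by simpa using h)]
        simp [eq_comm]

-- B's scan accepts a prefix
theorem npScan_prefix (v : List Char) : ∀ (xs : List Char), npScan xs (xs ++ v) = true := by
  intro xs
  induction xs with
  | nil => simp [npScan]
  | cons x xs ih => simpa [npScan] using ih

-- B's scan accepts one leading insertion
theorem npScan_cons : ∀ (xs : List Char) (c : Char), npScan xs (c :: xs) = true := by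
  intro xs
  induction xs with
  | nil => intro c; simp [npScan]
  | cons x xs ih =>
    intro c
    by_cases hxc : x = c
    · subst hxc; simpa [npScan] using ih x
    · simp [npScan, hxc]

-- B's scan accepts any one-longer superstring (the redundant substring branch of A)
theorem npScan_infix {xs ys : List Char} (hlen : ys.length = xs.length + 1)
    (hinf : xs <:+: ys) : npScan xs ys = true := by
  obtain ⟨u, v, huv⟩ := hinf
  have hl : u.length + v.length = 1 := by
    have := congrArg List.length huv
    simp at this
    omega
  cases u with
  | nil =>
    simp at huv
    subst huv
    exact npScan_prefix v xs
  | cons c u =>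
    cases u with
    | nil =>
      have hv : v = [] := by
        cases v with
        | nil => rfl
        | cons e w => simp at hl
      subst hv
      simp at huv
      subst huv
      exact npScan_cons xs c
    | cons d u => simp at hl; omega

-- ===== VERDICT (by name: the statement is the Claim_ definition above) =====
theorem is_near_pref_match_py_spec : Claim_equal_is_near_pref_match_py := by
  intro a b _
  unfold Spec_is_near_pref_match_py is_near_pref_match_py is_near_pref_match_py_alt
  generalize hA : a.toList = la
  generalize hB : b.toList = lb
  by_cases heq : la = lb
  · simp [heq]
  · simp only [if_neg heq]
    by_cases hfar : ((la.length : Int) - (lb.length : Int)).natAbs > 1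
    · simp [hfar]
    · simp only [if_neg hfar]
      have hdiff : la.length = lb.length ∨ lb.length = la.length + 1 ∨ la.length = lb.length + 1 := by
        omega
      rcases hdiff with hsame | hshort | hlong
      · -- equal lengths: the substring branch cannot fire (infix + equal length = equal)
        have hsub : ¬ (((PySem.Str.isIn a b || PySem.Str.isIn b a) && min la.length lb.length ≥ 4) = true) := by
          intro hc
          simp only [Bool.and_eq_true, Bool.or_eq_true] at hc
          rcases hc.1 with h1 | h1
          · have h2 := (PySem.Str.isIn_iff_infix _ _).mp h1
            rw [hA, hB] at h2
            exact heq (h2.eq_of_length hsame)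
          · have h2 := (PySem.Str.isIn_iff_infix _ _).mp h1
            rw [hA, hB] at h2
            exact heq (h2.eq_of_length hsame.symm).symm
        simp only [if_neg hsub, if_pos hsame]
        rw [show lb.length = la.length from hsame.symm,
           npLoopA_eq_len la.length la lb hsame 0]
        have hne : npMismatches la lb ≠ 0 := fun h0 => heq (npMismatches_zero hsame h0)
        rcases Nat.lt_or_ge (npMismatches la lb) 2 with h2 | h2
        · have : npMismatches la lb = 1 := by omega
          simp [this]
        · have h4 : npMismatches la lb ≠ 1 := by omega
          have h3 : ¬ (npMismatches la lb ≤ 1) := by omega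
          simp [h3, h4]
      · -- a one shorter than b
        have hns : ¬ (la.length = lb.length) := by omega
        have hlt : la.length < lb.length := by omega
        simp only [if_neg hns, if_pos hlt]
        by_cases hsub : (((PySem.Str.isIn a b || PySem.Str.isIn b a) && min la.length lb.length ≥ 4) = true)
        · simp only [if_pos hsub]
          simp only [Bool.and_eq_true, Bool.or_eq_true] at hsub
          rcases hsub.1 with h1 | h1
          · have h2 := (PySem.Str.isIn_iff_infix _ _).mp h1
            rw [hA, hB] at h2
            exact (npScan_infix hshort h2).symm
          · have h2 := ((PySem.Str.isIn_iff_infix _ _).mp h1).length_le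
            rw [hA, hB] at h2
            omega
        · simp only [if_neg hsub]
          exact npLoopA_scan la.length lb.length hlt la lb hshort
      · -- b one shorter than a
        have hns : ¬ (la.length = lb.length) := by omega
        have hnlt : ¬ (la.length < lb.length) := by omega
        have hlt : lb.length < la.length := by omega
        simp only [if_neg hns, if_neg hnlt]
        by_cases hsub : (((PySem.Str.isIn a b || PySem.Str.isIn b a) && min la.length lb.length ≥ 4) = true)
        · simp only [if_pos hsub]
          simp only [Bool.and_eq_true, Bool.or_eq_true] at hsub
          rcases hsub.1 with h1 | h1
          · have h2 := ((PySem.Str.isIn_iff_infix _ _).mp h1).length_le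
            rw [hA, hB] at h2
            omega
          · have h2 := (PySem.Str.isIn_iff_infix _ _).mp h1
            rw [hA, hB] at h2
            exact (npScan_infix hlong h2).symm
        · simp only [if_neg hsub]
          exact npLoopA_scan' la.length lb.length hlt la lb hlong
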